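-- pv_equiv track=rewrite | github.com/Aashil412/Leet1 | 1952-three-divisors/1952-three-divisors.py | isThree
-- ===== SOURCE A (Python) =====
-- def isThree(n: int) -> bool:
--     count = 1
--     for i in range(n, 1, -1):
--         if n % i == 0:
--             count += 1
--     if count == 3:
--         return True
--     return False
-- ===== SOURCE B (Python) =====
-- def isThree(n: int) -> bool:
--     # exactly three divisors iff n is the square of its smallest prime factor:
--     # scan d = 2, 3, ... while d*d <= n; at the first divisor d, answer d*d == n
--     d = 2
--     while d * d <= n:
--         if n % d == 0:
--             return d * d == n
--         d += 1
--     return False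
-- ===== Notes on version B (the rewrite author's own statement) =====
-- stated objective: faster
-- what changed: Instead of counting every divisor by scanning all of range(n,1,-1), B trial-divides only up to sqrt(n) and answers at the first divisor d found: n has exactly three divisors iff d*d == n (n is the square of its smallest prime factor).
import Mathlib
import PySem

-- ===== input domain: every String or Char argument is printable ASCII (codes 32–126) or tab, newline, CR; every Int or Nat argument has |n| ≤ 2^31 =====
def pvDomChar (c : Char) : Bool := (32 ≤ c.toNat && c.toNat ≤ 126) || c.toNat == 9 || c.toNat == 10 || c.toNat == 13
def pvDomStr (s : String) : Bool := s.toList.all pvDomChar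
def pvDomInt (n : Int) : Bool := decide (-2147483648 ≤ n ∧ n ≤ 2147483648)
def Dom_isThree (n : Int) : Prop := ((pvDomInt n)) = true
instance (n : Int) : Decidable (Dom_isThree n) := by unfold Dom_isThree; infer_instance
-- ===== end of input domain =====

-- B replaces A's O(n) scan of range(n,1,-1) by trial division up to sqrt(n): n has
-- exactly three divisors iff the first divisor d ≥ 2 with d*d ≤ n satisfies d*d == n.

-- ===== PORT A =====
def isThree (n : Int) : Bool :=
  let count : Int := (PySem.List.pyRange n 1 (-1)).foldl
    (fun count i => if PySem.Int.mod n i == 0 then count + 1 else count) 1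
  if count == 3 then true else false

-- ===== PORT B =====
-- termination helper for the 'while d * d <= n' loop: d ≤ d*d for every integer d
theorem pv_le_sq (d : Int) : d ≤ d * d := by nlinarith [sq_nonneg (2*d - 1)]

-- the 'while d * d <= n' loop of Source B
def isThreeLoop (n d : Int) : Bool :=
  if _h : d * d ≤ n then
    if PySem.Int.mod n d == 0 then d * d == n
    else isThreeLoop n (d + 1)
  else false
termination_by (n + 1 - d).toNat
decreasing_by
  have := pv_le_sq d
  omega

def isThree_alt (n : Int) : Bool := isThreeLoop n 2

-- ===== PRECONDITION & SPEC =====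
def Spec_isThree (n : Int) (out : Bool) : Prop := out = isThree_alt n
instance (n : Int) (out : Bool) : Decidable (Spec_isThree n out) := by unfold Spec_isThree; infer_instance

-- ===== CLAIM (what is proved, stated in full; the proofs are below) =====
def Claim_equal_isThree : Prop := ∀ (n : Int), Dom_isThree n → Spec_isThree n (isThree n)

-- ===== LEMMAS AND PROOFS =====

-- B's loop returns true iff some c ≥ d squares to n and nothing in [d, c) divides n
theorem isThreeLoop_iff_aux : ∀ (k : Nat) (n d : Int), (n + 1 - d).toNat = k → 2 ≤ d →
    (isThreeLoop n d = true ↔ ∃ c, d ≤ c ∧ c * c = n ∧ ∀ e, d ≤ e → e < c → ¬ e ∣ n) := by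
  intro k
  induction k using Nat.strong_induction_on with
  | _ k ih =>
  intro n d hk hd
  rw [isThreeLoop]
  by_cases h : d * d ≤ n
  · rw [dif_pos h]
    by_cases hmod : (PySem.Int.mod n d == 0) = true
    · rw [if_pos hmod]
      have hdvd : d ∣ n := (PySem.Int.mod_eq_zero_iff_dvd n d).mp (by simpa using hmod)
      rw [beq_iff_eq]
      constructor
      · intro heq
        exact ⟨d, le_refl d, heq, fun e h1 h2 _ => absurd (lt_of_le_of_lt h1 h2) (lt_irrefl _)⟩
      · rintro ⟨c, hc1, hc2, hc3⟩
        have hcd : c = d := by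
          by_contra hne
          exact hc3 d (le_refl d) (lt_of_le_of_ne hc1 (Ne.symm hne)) hdvd
        rw [← hcd]; exact hc2
    · rw [if_neg hmod]
      have hndvd : ¬ d ∣ n := fun hdvd => hmod (by simpa using (PySem.Int.mod_eq_zero_iff_dvd n d).mpr hdvd)
      have hdn : d ≤ n := le_trans (pv_le_sq d) h
      rw [ih (n + 1 - (d + 1)).toNat (by omega) n (d + 1) rfl (by omega)]
      constructor
      · rintro ⟨c, hc1, hc2, hc3⟩
        refine ⟨c, by omega, hc2, fun e h1 h2 he => ?_⟩
        rcases eq_or_lt_of_le h1 with rfl | hlt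
        · exact hndvd he
        · exact hc3 e (by omega) h2 he
      · rintro ⟨c, hc1, hc2, hc3⟩
        have hcd : c ≠ d := fun hcd => hndvd (hcd ▸ ⟨c, by rw [← hc2, hcd]⟩)
        exact ⟨c, by omega, hc2, fun e h1 h2 he => hc3 e (by omega) h2 he⟩
  · rw [dif_neg h]
    simp only [Bool.false_eq_true, false_iff]
    rintro ⟨c, hc1, hc2, -⟩
    have : d * d ≤ c * c := by nlinarith
    omega

theorem isThreeLoop_iff (n d : Int) (hd : 2 ≤ d) :
    isThreeLoop n d = true ↔ ∃ c, d ≤ c ∧ c * c = n ∧ ∀ e, d ≤ e → e < c → ¬ e ∣ n :=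
  isThreeLoop_iff_aux (n + 1 - d).toNat n d rfl hd

-- counting divisors in [2, m] (Nat): exactly two iff m is the square of a "small-minimal" p
theorem middle_nat (m : Nat) (hm : 2 ≤ m) :
    ((Finset.Icc 2 m).filter (· ∣ m)).card = 2 ↔
      ∃ p, 2 ≤ p ∧ p * p = m ∧ ∀ e, 2 ≤ e → e < p → ¬ e ∣ m := by
  constructor
  · intro hcard
    by_cases hpr : m.Prime
    · exfalso
      have : ((Finset.Icc 2 m).filter (· ∣ m)) = {m} := by
        ext i
        simp only [Finset.mem_filter, Finset.mem_Icc, Finset.mem_singleton]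
        constructor
        · rintro ⟨⟨h2, hle⟩, hdvd⟩
          rcases (Nat.Prime.eq_one_or_self_of_dvd hpr i hdvd) with rfl | rfl
          · omega
          · rfl
        · rintro rfl; exact ⟨⟨hm, le_refl _⟩, dvd_refl _⟩
      rw [this] at hcard
      simp at hcard
    · set p := m.minFac with hpdef
      have hpd : p ∣ m := Nat.minFac_dvd m
      have hp2 : 2 ≤ p := (Nat.minFac_prime (by omega)).two_le
      have hpp : p * p ≤ m := by
        have := Nat.minFac_sq_le_self (by omega) hpr
        nlinarith [this]
      have hmq : m = p * (m / p) := (Nat.mul_div_cancel' hpd).symm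
      set q := m / p with hqdef
      have hpq : p ≤ q := Nat.le_div_iff_mul_le (by omega) |>.mpr hpp
      have hqd : q ∣ m := ⟨p, by rw [hmq]; ring⟩
      have hqm : q < m := by
        have : m / p ≤ m / 2 := Nat.div_le_div_left hp2 (by omega)
        have : m / 2 < m := Nat.div_lt_self (by omega) (by omega)
        omega
      refine ⟨p, hp2, ?_, fun e he1 he2 hed => ?_⟩
      · by_contra hne
        have hpqne : p ≠ q := fun hpq' => hne (by rw [hmq, ← hpq'])
        have hsub : ({p, q, m} : Finset ℕ) ⊆ (Finset.Icc 2 m).filter (· ∣ m) := by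
          intro x hx
          simp only [Finset.mem_insert, Finset.mem_singleton] at hx
          simp only [Finset.mem_filter, Finset.mem_Icc]
          rcases hx with rfl | rfl | rfl
          · exact ⟨⟨hp2, Nat.le_of_dvd (by omega) hpd⟩, hpd⟩
          · exact ⟨⟨by omega, by omega⟩, hqd⟩
          · exact ⟨⟨hm, le_refl _⟩, dvd_refl _⟩
        have hc3 : ({p, q, m} : Finset ℕ).card = 3 := by
          rw [Finset.card_insert_of_notMem (by simp; omega),
              Finset.card_insert_of_notMem (by simp; omega), Finset.card_singleton]
        have := Finset.card_le_card hsub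
        omega
      · exact absurd (Nat.minFac_le_of_dvd he1 hed) (by omega)
  · rintro ⟨p, hp2, hppm, hmin⟩
    have hpd : p ∣ m := ⟨p, hppm.symm⟩
    have hprime : p.Prime := by
      rw [Nat.prime_def_lt]
      refine ⟨hp2, fun e helt hed => ?_⟩
      have hedm : e ∣ m := hed.trans hpd
      have hene : e ≠ 0 := by rintro rfl; rw [Nat.zero_dvd] at hed; omega
      by_contra he1
      exact hmin e (by omega) helt hedm
    have hset : ((Finset.Icc 2 m).filter (· ∣ m)) = {p, m} := by
      ext i
      simp only [Finset.mem_filter, Finset.mem_Icc, Finset.mem_insert, Finset.mem_singleton]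
      constructor
      · rintro ⟨⟨h2, hle⟩, hdvd⟩
        have : i ∣ p ^ 2 := by rw [pow_two, hppm]; exact hdvd
        rcases (Nat.dvd_prime_pow hprime).mp this with ⟨k, hk, rfl⟩
        interval_cases k
        · norm_num at h2
        · left; exact pow_one p
        · right; rw [pow_two, hppm]
      · rintro (rfl | rfl)
        · exact ⟨⟨hp2, Nat.le_of_dvd (by omega) hpd⟩, hpd⟩
        · exact ⟨⟨hm, le_refl _⟩, dvd_refl _⟩
    rw [hset]
    have : p ≠ m := by nlinarith
    rw [Finset.card_insert_of_notMem (by simpa using this), Finset.card_singleton]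

-- bridge the Int divisor count to the Nat one
theorem card_bridge (n : Int) (hn : 2 ≤ n) :
    ((Finset.Icc (2:Int) n).filter (fun i => i ∣ n)).card =
    ((Finset.Icc 2 n.toNat).filter (· ∣ n.toNat)).card := by
  have hnm : ((n.toNat : Int)) = n := Int.toNat_of_nonneg (by omega)
  have himg : ((Finset.Icc (2:Int) n).filter (fun i => i ∣ n)) =
      ((Finset.Icc 2 n.toNat).filter (· ∣ n.toNat)).image (fun a : Nat => (a : Int)) := by
    ext x
    simp only [Finset.mem_filter, Finset.mem_Icc, Finset.mem_image]
    constructor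
    · rintro ⟨⟨h2, hle⟩, hdvd⟩
      refine ⟨x.toNat, ⟨⟨by omega, by omega⟩, ?_⟩, by omega⟩
      have hx : ((x.toNat : Int)) = x := Int.toNat_of_nonneg (by omega)
      rw [← Int.natCast_dvd_natCast, hx, hnm]; exact hdvd
    · rintro ⟨a, ⟨⟨h2, hle⟩, hdvd⟩, rfl⟩
      refine ⟨⟨by omega, by omega⟩, ?_⟩
      rw [← hnm]; exact_mod_cast hdvd
  rw [himg, Finset.card_image_of_injective _ (fun a b h => by exact_mod_cast h)]

-- A's count: 3 iff n ≥ 2 and exactly two divisors lie in [2, n]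
theorem isThree_eq (n : Int) :
    isThree n = true ↔ 2 ≤ n ∧ ((Finset.Icc (2:Int) n).filter (fun i => i ∣ n)).card = 2 := by
  unfold isThree
  rw [PySem.List.foldl_count_if]
  by_cases hn : 2 ≤ n
  · have hset : (PySem.List.pyRange n 1 (-1)).toFinset = Finset.Icc (2:Int) n := by
      ext x
      simp only [List.mem_toFinset, PySem.List.mem_pyRange_neg_one, Finset.mem_Icc]
      omega
    have hnd : (PySem.List.pyRange n 1 (-1)).Nodup := by
      rw [PySem.List.pyRange_neg_one]
      exact (List.nodup_range).map (fun a b h => by omega)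
    have hcount : (List.countP (fun i => PySem.Int.mod n i == 0) (PySem.List.pyRange n 1 (-1)))
        = ((Finset.Icc (2:Int) n).filter (fun i => i ∣ n)).card := by
      rw [← hset]
      rw [List.countP_eq_length_filter, ← List.toFinset_card_of_nodup (hnd.filter _),
          List.toFinset_filter]
      congr 1
      apply Finset.filter_congr
      intro x _
      simp [PySem.Int.mod_eq_zero_iff_dvd]
    rw [hcount]
    simp only [beq_iff_eq]
    constructor
    · intro h
      split at h
      · next heq => exact ⟨hn, by omega⟩
      · simp at h
    · rintro ⟨-, hc⟩
      rw [if_pos (by omega)]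
  · push Not at hn
    have : PySem.List.pyRange n 1 (-1) = [] := by
      rw [PySem.List.pyRange_neg_one, show (n - 1).toNat = 0 by omega]
      rfl
    rw [this]
    simp only [List.countP_nil]
    norm_num
    omega

-- glue over Int: the witness c forces 2 ≤ n
theorem middle_int (n : Int) :
    (2 ≤ n ∧ ((Finset.Icc (2:Int) n).filter (fun i => i ∣ n)).card = 2) ↔
      ∃ c, 2 ≤ c ∧ c * c = n ∧ ∀ e, 2 ≤ e → e < c → ¬ e ∣ n := by
  constructor
  · rintro ⟨hn, hcard⟩
    rw [card_bridge n hn] at hcard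
    rcases (middle_nat n.toNat (by omega)).mp hcard with ⟨p, hp2, hppm, hmin⟩
    refine ⟨(p : Int), by exact_mod_cast hp2, ?_, fun e he1 he2 hed => ?_⟩
    · rw [show n = ((n.toNat : Nat) : Int) from (Int.toNat_of_nonneg (by omega)).symm, ← hppm]
      push_cast
      ring
    · have hnm : ((n.toNat : Int)) = n := Int.toNat_of_nonneg (by omega)
      refine hmin e.toNat (by omega) (by omega) ?_
      rw [← Int.natCast_dvd_natCast, Int.toNat_of_nonneg (by omega), hnm]
      exact hed
  · rintro ⟨c, hc2, hccn, hmin⟩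
    have hn : 2 ≤ n := by nlinarith
    refine ⟨hn, ?_⟩
    rw [card_bridge n hn]
    refine (middle_nat n.toNat (by omega)).mpr ⟨c.toNat, by omega, ?_, fun e he1 he2 hed => ?_⟩
    · have h1 : ((c.toNat : Nat) : Int) = c := Int.toNat_of_nonneg (by omega)
      have h2 : ((c.toNat * c.toNat : Nat) : Int) = ((n.toNat : Nat) : Int) := by
        push_cast
        rw [h1, Int.toNat_of_nonneg (by omega), hccn]
      exact_mod_cast h2
    · refine hmin (e : Int) (by exact_mod_cast he1) (by omega) ?_
      rw [show n = ((n.toNat : Nat) : Int) from (Int.toNat_of_nonneg (by omega)).symm]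
      exact_mod_cast hed

-- ===== VERDICT (by name: the statement is the Claim_ definition above) =====
theorem isThree_spec : Claim_equal_isThree := by
  intro n _
  unfold Spec_isThree
  rw [Bool.eq_iff_iff]
  rw [isThree_eq, show isThree_alt n = isThreeLoop n 2 from rfl,
      isThreeLoop_iff n 2 (le_refl 2)]
  exact middle_int n
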